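-- pv_equiv track=rewrite | github.com/dggzlz/Blueprints | asg4.py | get_scores
-- ===== SOURCE A (Python) =====
-- def get_scores(building_list : list) -> list:
--     """
--     The function takes the building list and it stores each of the material's score.
--     Then it calculates the total score from each material and append each of
--     them to a score list.
--
--
--     Argument:
--     (list) building list - a list with the rows or floor from the building. Represented as 2D list
--
--     Returns:
--     (list) score total - each of the score from each material all in one list
--     """
--     glass_score = 0
--     recycled_score = 0
--     stone_score = 0
--     wood_score = 0
--     # These are the variables to storage the score from each material
--
--     count = 0 # It's used for the recycled score to keep track of how many R are found in total
--
--     for row_index in range(len(building_list)): # it gives access to the rows from the table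
--         row = building_list[row_index] # storage each row from the list
--         for col_index in range(len(row)): # it gives access to each to the columns of the table
--             col = building_list[row_index][col_index] # storage each die
--             if '--' in col:
--                 continue # jump to the next column
--             elif 'G' in col:
--             # for every G found in the list, it takes the number that it attached to and
--             # and it adds that number to the glass score
--                 glass_score += int(col[1])
--
--             elif 'R' in col:
--             # for every R found it's going to add 1 to the count.
--                 count += 1
--
--             elif 'S' in col:
--             # for each row, since the table is reversed, it's going to add the specific
--             # points depending on the row index the S was found to stone score(see lines 75-82). by flipping the table then
--             # I'm able to score from zero as the lowest row in the building
--                 if row_index == 0: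
--                     stone_score += 2
--                 elif row_index == 1:
--                     stone_score += 3
--                 elif row_index == 2:
--                     stone_score += 5
--                 else:
--                     stone_score += 8
--
--             elif 'W' in col:
--             # for every W found, it's going to check all the adjancents from the position of the variable
--             # then for every non empty space in the adjacents, then it's going to add 2 points to wood score
--                 if building_list.index(row) > 0:
--                     if building_list[row_index - 1][col_index] != '--': # checks for elements above
--                         wood_score += 2
--                 if building_list.index(row) < (len(building_list) - 1):
--                     if building_list[row_index + 1][col_index] != '--':# checks for elements below
--                         wood_score += 2
--                 if row.index(col) > 0:
--                     if building_list[row_index][col_index - 1] != '--': # checks for elements on the left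
--                         wood_score += 2
--                 if row.index(col) < (len(row) -1):
--                     if building_list[row_index][col_index + 1] != '--': # checks for elements on the right
--                         wood_score += 2
--     # this block of code assigns the value of the recycled score by comparing the count variable
--     if count == 0:
--         recycled_score = 0
--     elif count == 1:
--         recycled_score = 2
--     elif count == 2:
--         recycled_score = 5
--     elif count == 3:
--         recycled_score = 10
--     elif count == 4:
--         recycled_score = 15
--     elif count == 5:
--         recycled_score = 20
--     else:
--         recycled_score = 30
--
--     # this is the list with the total score. It has all the scores from each material
--     return [glass_score, recycled_score, stone_score, wood_score]
-- ===== SOURCE B (Python) =====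
-- def get_scores(building_list : list) -> list:
--     """Scores the building grid with one separate pass per material
--     (glass / recycled / stone / wood) instead of one combined loop."""
--
--     def material(cell):
--         for m in ('--', 'G', 'R', 'S', 'W'):
--             if m in cell:
--                 return m
--         return ''
--
--     glass = sum(int(c[1]) for row in building_list for c in row
--                 if material(c) == 'G')
--
--     count = sum(1 for row in building_list for c in row if material(c) == 'R')
--     recycled = [0, 2, 5, 10, 15, 20][count] if count <= 5 else 30
--
--     stone = sum([2, 3, 5, 8][min(r, 3)]
--                 for r, row in enumerate(building_list) for c in row
--                 if material(c) == 'S')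
--
--     def filled(r, c):
--         return (0 <= r < len(building_list)
--                 and 0 <= c < len(building_list[r])
--                 and building_list[r][c] != '--')
--
--     wood = sum(2
--                for r, row in enumerate(building_list)
--                for ci, c in enumerate(row) if material(c) == 'W'
--                for dr, dc in ((-1, 0), (1, 0), (0, -1), (0, 1))
--                if filled(r + dr, ci + dc))
--
--     return [glass, recycled, stone, wood]
-- ===== Notes on version B (the rewrite author's own statement) =====
-- stated objective: alternative
-- what changed: A's single combined scan with a 4-part mutable state and an elif chain is replaced by one separate pass per material: comprehension sums for glass/recycled/stone with lookup tables ([0,2,5,10,15,20] and [2,3,5,8][min(r,3)]) replacing A's if/elif score chains, and a wood pass that counts non-empty neighbours through a bounds-checked filled(r,c) helper over the four offsets.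
-- intended difference: On grids where a wood cell sits in a row equal to an earlier row, or equals an earlier cell of its row, A's building_list.index(row)/row.index(col) point at the first duplicate and A wrongly skips the above/left neighbour check, under-counting wood (e.g. [['W1','W1','--']] -> [0,0,0,2]); B uses the cell's true coordinates and returns the intended neighbour count ([0,0,0,4]). — e.g. on get_scores([["W1", "W1", "--"]]): A returns [0, 0, 0, 2], B returns [0, 0, 0, 4]
import Mathlib
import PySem

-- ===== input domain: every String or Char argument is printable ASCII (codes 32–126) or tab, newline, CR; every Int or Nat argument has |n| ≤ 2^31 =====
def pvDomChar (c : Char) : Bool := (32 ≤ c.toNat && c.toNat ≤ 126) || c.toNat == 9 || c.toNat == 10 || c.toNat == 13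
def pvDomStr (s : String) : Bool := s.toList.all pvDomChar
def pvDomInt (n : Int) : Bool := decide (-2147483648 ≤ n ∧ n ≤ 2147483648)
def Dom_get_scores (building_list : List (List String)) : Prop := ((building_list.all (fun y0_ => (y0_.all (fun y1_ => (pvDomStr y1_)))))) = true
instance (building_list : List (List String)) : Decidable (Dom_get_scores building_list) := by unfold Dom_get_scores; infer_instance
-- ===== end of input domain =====

-- B scores each material in its own pass (comprehension sums with lookup tables, and a
-- bounds-checked neighbour helper for wood) instead of A's single combined elif scan;
-- on duplicate rows/cells A's .index-based wood pass under-counts and B returns the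
-- intended count (stated as D_ below). No speed claim.

-- ===== PORT A =====
def get_scores (building_list : List (List String)) : List Int :=
  let st : Int × Int × Int × Int :=
    (PySem.List.pyRange 0 (building_list.length : Int) 1).foldl (fun st row_index =>
      let row := PySem.List.pyGetD building_list row_index []
      (PySem.List.pyRange 0 (row.length : Int) 1).foldl (fun st col_index =>
        let col := PySem.List.pyGetD (PySem.List.pyGetD building_list row_index []) col_index ""
        if PySem.Str.isIn "--" col then st
        else if PySem.Str.isIn "G" col then
          -- int(col[1]); Pre_ guarantees the index and the parse succeed
          (st.1 + ((PySem.Str.pyGet? col 1).bind (fun ch => PySem.Int.ofChars? [ch])).getD 0,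
           st.2.1, st.2.2.1, st.2.2.2)
        else if PySem.Str.isIn "R" col then
          (st.1, st.2.1 + 1, st.2.2.1, st.2.2.2)
        else if PySem.Str.isIn "S" col then
          (st.1, st.2.1,
           st.2.2.1 + (if row_index = 0 then 2 else if row_index = 1 then 3
                       else if row_index = 2 then 5 else 8),
           st.2.2.2)
        else if PySem.Str.isIn "W" col then
          let fr : Int := ((PySem.List.index? building_list row).getD 0 : Nat)
          let w1 : Int := if fr > 0 then
              (if PySem.List.pyGetD (PySem.List.pyGetD building_list (row_index - 1) []) col_index "" ≠ "--" then 2 else 0) else 0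
          let w2 : Int := if fr < (building_list.length : Int) - 1 then
              (if PySem.List.pyGetD (PySem.List.pyGetD building_list (row_index + 1) []) col_index "" ≠ "--" then 2 else 0) else 0
          let fc : Int := ((PySem.List.index? row col).getD 0 : Nat)
          let w3 : Int := if fc > 0 then
              (if PySem.List.pyGetD (PySem.List.pyGetD building_list row_index []) (col_index - 1) "" ≠ "--" then 2 else 0) else 0
          let w4 : Int := if fc < (row.length : Int) - 1 then
              (if PySem.List.pyGetD (PySem.List.pyGetD building_list row_index []) (col_index + 1) "" ≠ "--" then 2 else 0) else 0
          (st.1, st.2.1, st.2.2.1, st.2.2.2 + w1 + w2 + w3 + w4)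
        else st) st) (0, 0, 0, 0)
  let recycled : Int :=
    if st.2.1 = 0 then 0 else if st.2.1 = 1 then 2 else if st.2.1 = 2 then 5
    else if st.2.1 = 3 then 10 else if st.2.1 = 4 then 15 else if st.2.1 = 5 then 20 else 30
  [st.1, recycled, st.2.2.1, st.2.2.2]

-- ===== PORT B =====
-- material(cell): first matching marker of the priority chain
def material (c : String) : String :=
  if PySem.Str.isIn "--" c then "--"
  else if PySem.Str.isIn "G" c then "G"
  else if PySem.Str.isIn "R" c then "R"
  else if PySem.Str.isIn "S" c then "S"
  else if PySem.Str.isIn "W" c then "W"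
  else ""

-- int(c[1])
def cellInt (c : String) : Int :=
  ((PySem.Str.pyGet? c 1).bind (fun ch => PySem.Int.ofChars? [ch])).getD 0

-- filled(r, c): bounds-checked non-empty test
def filledB (bl : List (List String)) (r c : Int) : Bool :=
  decide (0 ≤ r ∧ r < (bl.length : Int) ∧ 0 ≤ c ∧ c < ((PySem.List.pyGetD bl r []).length : Int)
    ∧ PySem.List.pyGetD (PySem.List.pyGetD bl r []) c "" ≠ "--")

def get_scores_alt (building_list : List (List String)) : List Int :=
  let glass : Int :=
    (building_list.flatMap (fun row => (row.filter (fun c => material c = "G")).map cellInt)).sum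
  let count : Nat :=
    (building_list.flatMap (fun row => row.filter (fun c => material c = "R"))).length
  let recycled : Int :=
    if count ≤ 5 then PySem.List.pyGetD ([0, 2, 5, 10, 15, 20] : List Int) (count : Int) 0 else 30
  let stone : Int :=
    ((PySem.List.enumerate building_list 0).flatMap (fun p =>
      (p.2.filter (fun c => material c = "S")).map (fun _ =>
        PySem.List.pyGetD ([2, 3, 5, 8] : List Int) (min p.1 3) 0))).sum
  let wood : Int :=
    ((PySem.List.enumerate building_list 0).flatMap (fun p =>
      (PySem.List.enumerate p.2 0).flatMap (fun q =>
        if material q.2 = "W" then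
          (([((-1 : Int), (0 : Int)), (1, 0), (0, -1), (0, 1)]).filter
            (fun d => filledB building_list (p.1 + d.1) (q.1 + d.2))).map (fun _ => (2 : Int))
        else []))).sum
  [glass, recycled, stone, wood]

-- ===== PRECONDITION & SPEC =====
-- Pre_ excludes exactly the inputs on which the Python A raises: a glass cell whose
-- second character is missing or not parseable by int(), and a wood cell whose
-- neighbour access goes out of range (last duplicated row, ragged or short rows).
def Pre_get_scores (building_list : List (List String)) : Prop :=
  ∀ p ∈ PySem.List.enumerate building_list 0, ∀ q ∈ PySem.List.enumerate p.2 0,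
    (¬ PySem.Str.isIn "--" q.2 = true) →
      ((PySem.Str.isIn "G" q.2 = true →
          ((PySem.Str.pyGet? q.2 1).bind (fun ch => PySem.Int.ofChars? [ch])).isSome = true) ∧
       ((¬ PySem.Str.isIn "G" q.2 = true) → (¬ PySem.Str.isIn "R" q.2 = true) →
        (¬ PySem.Str.isIn "S" q.2 = true) → PySem.Str.isIn "W" q.2 = true →
          ((0 < (PySem.List.index? building_list p.2).getD 0 →
              (PySem.List.pyGet? (PySem.List.pyGetD building_list (p.1 - 1) []) q.1).isSome = true) ∧
           (((PySem.List.index? building_list p.2).getD 0 : Int) < (building_list.length : Int) - 1 →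
              ((PySem.List.pyGet? building_list (p.1 + 1)).bind
                 (fun r2 => PySem.List.pyGet? r2 q.1)).isSome = true) ∧
           (((PySem.List.index? p.2 q.2).getD 0 : Int) < (p.2.length : Int) - 1 →
              (PySem.List.pyGet? p.2 (q.1 + 1)).isSome = true))))

instance (building_list : List (List String)) : Decidable (Pre_get_scores building_list) := by
  unfold Pre_get_scores; infer_instance

def pvWitness_get_scores : List (List String) := [["G3", "--"], ["W1", "S2"]]

-- On grids where a wood cell's row equals an earlier row, or the cell equals an earlier
-- cell of its row, A's building_list.index(row)/row.index(col) point at the first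
-- duplicate and A wrongly skips the above/left neighbour check, under-counting wood;
-- B uses the cell's true coordinates and returns the intended neighbour count.
def D_get_scores (building_list : List (List String)) : Prop :=
  ∃ p ∈ PySem.List.enumerate building_list 0, ∃ q ∈ PySem.List.enumerate p.2 0,
    (¬ PySem.Str.isIn "--" q.2 = true) ∧ (¬ PySem.Str.isIn "G" q.2 = true) ∧
    (¬ PySem.Str.isIn "R" q.2 = true) ∧ (¬ PySem.Str.isIn "S" q.2 = true) ∧
    PySem.Str.isIn "W" q.2 = true ∧
    (((PySem.List.index? building_list p.2).getD 0 = 0 ∧ 0 < p.1 ∧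
        q.1 < ((PySem.List.pyGetD building_list (p.1 - 1) []).length : Int) ∧
        PySem.List.pyGetD (PySem.List.pyGetD building_list (p.1 - 1) []) q.1 "" ≠ "--")
     ∨ ((PySem.List.index? p.2 q.2).getD 0 = 0 ∧ 0 < q.1 ∧
        PySem.List.pyGetD p.2 (q.1 - 1) "" ≠ "--"))

instance (building_list : List (List String)) : Decidable (D_get_scores building_list) := by
  unfold D_get_scores; infer_instance

def Spec_get_scores (building_list : List (List String)) (out : List Int) : Prop :=
  ¬ D_get_scores building_list → out = get_scores_alt building_list
instance (building_list : List (List String)) (out : List Int) : Decidable (Spec_get_scores building_list out) := by unfold Spec_get_scores; infer_instance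

def pvDiffWitness_get_scores : List (List String) := [["W1", "W1", "--"]]
def pvDiffWitnessOut_get_scores : (List Int) × (List Int) := ([0, 0, 0, 2], [0, 0, 0, 4])

-- ===== CLAIM (what is proved, stated in full; the proofs are below) =====
def Claim_unchanged_get_scores : Prop := ∀ (building_list : List (List String)), Dom_get_scores building_list → Pre_get_scores building_list → Spec_get_scores building_list (get_scores building_list)
def Claim_changed_get_scores : Prop := Dom_get_scores (pvDiffWitness_get_scores) ∧ Pre_get_scores (pvDiffWitness_get_scores) ∧ D_get_scores (pvDiffWitness_get_scores) ∧ get_scores (pvDiffWitness_get_scores) = pvDiffWitnessOut_get_scores.1 ∧ get_scores_alt (pvDiffWitness_get_scores) = pvDiffWitnessOut_get_scores.2 ∧ pvDiffWitnessOut_get_scores.1 ≠ pvDiffWitnessOut_get_scores.2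
def Claim_exact_get_scores : Prop := ∀ (building_list : List (List String)), Dom_get_scores building_list → Pre_get_scores building_list → D_get_scores building_list → get_scores building_list ≠ get_scores_alt building_list

-- ===== LEMMAS AND PROOFS =====

-- per-cell contributions of A's single scan, one per material (same branch order as A)
def dG (c : String) : Int :=
  if PySem.Str.isIn "--" c then 0
  else if PySem.Str.isIn "G" c then cellInt c
  else 0

def dR (c : String) : Int :=
  if PySem.Str.isIn "--" c then 0
  else if PySem.Str.isIn "G" c then 0
  else if PySem.Str.isIn "R" c then 1
  else 0

def dS (ri : Int) (c : String) : Int :=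
  if PySem.Str.isIn "--" c then 0
  else if PySem.Str.isIn "G" c then 0
  else if PySem.Str.isIn "R" c then 0
  else if PySem.Str.isIn "S" c then
    (if ri = 0 then 2 else if ri = 1 then 3 else if ri = 2 then 5 else 8)
  else 0

def dW (bl : List (List String)) (ri : Int) (row : List String) (ci : Int) (c : String) : Int :=
  if PySem.Str.isIn "--" c then 0
  else if PySem.Str.isIn "G" c then 0
  else if PySem.Str.isIn "R" c then 0
  else if PySem.Str.isIn "S" c then 0
  else if PySem.Str.isIn "W" c then
    (let fr : Int := ((PySem.List.index? bl row).getD 0 : Nat)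
     let fc : Int := ((PySem.List.index? row c).getD 0 : Nat)
     (if fr > 0 then (if PySem.List.pyGetD (PySem.List.pyGetD bl (ri - 1) []) ci "" ≠ "--" then 2 else 0) else 0)
   + (if fr < (bl.length : Int) - 1 then (if PySem.List.pyGetD (PySem.List.pyGetD bl (ri + 1) []) ci "" ≠ "--" then 2 else 0) else 0)
   + (if fc > 0 then (if PySem.List.pyGetD row (ci - 1) "" ≠ "--" then 2 else 0) else 0)
   + (if fc < (row.length : Int) - 1 then (if PySem.List.pyGetD row (ci + 1) "" ≠ "--" then 2 else 0) else 0))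
  else 0

-- per-cell wood contribution of B
def wB (bl : List (List String)) (ri ci : Int) (c : String) : Int :=
  if material c = "W" then
    (if filledB bl (ri - 1) ci then 2 else 0) + (if filledB bl (ri + 1) ci then 2 else 0)
  + (if filledB bl ri (ci - 1) then 2 else 0) + (if filledB bl ri (ci + 1) then 2 else 0)
  else 0

def recChain (c : Int) : Int :=
  if c = 0 then 0 else if c = 1 then 2 else if c = 2 then 5
  else if c = 3 then 10 else if c = 4 then 15 else if c = 5 then 20 else 30

def cellSum (bl : List (List String)) (δ : Int → List String → Int → String → Int) : Int :=
  ((PySem.List.enumerate bl 0).map (fun p =>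
    ((PySem.List.enumerate p.2 0).map (fun q => δ p.1 p.2 q.1 q.2)).sum)).sum

lemma foldl_ext {α β : Type} (f g : β → α → β) (h : ∀ b a, f b a = g b a) (l : List α) (s : β) :
    l.foldl f s = l.foldl g s := by
  induction l generalizing s with
  | nil => rfl
  | cons x xs ih => simp only [List.foldl_cons, h, ih]

lemma foldl4 {α : Type} (f1 f2 f3 f4 : α → Int) (l : List α) (s : Int × Int × Int × Int) :
    l.foldl (fun st x => (st.1 + f1 x, st.2.1 + f2 x, st.2.2.1 + f3 x, st.2.2.2 + f4 x)) s
  = (s.1 + (l.map f1).sum, s.2.1 + (l.map f2).sum, s.2.2.1 + (l.map f3).sum, s.2.2.2 + (l.map f4).sum) := by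
  induction l generalizing s with
  | nil => simp
  | cons x xs ih => simp [ih, add_assoc]

lemma sum_idx_enum {α : Type} (l : List α) (d : α) (g : Int → α → Int) (s : Int) :
    ((PySem.List.pyRange 0 (l.length : Int) 1).map
      (fun i => g (s + i) (PySem.List.pyGetD l i d))).sum
  = ((PySem.List.enumerate l s).map (fun q => g q.1 q.2)).sum := by
  rw [PySem.List.pyRange_one]
  simp only [sub_zero, Int.toNat_natCast]
  induction l generalizing s with
  | nil => simp [PySem.List.enumerate]
  | cons x xs ih =>
    rw [List.length_cons, List.range_succ_eq_map]
    simp only [List.map_cons, List.map_map, PySem.List.enumerate_cons, List.sum_cons,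
      Function.comp_def, zero_add]
    congr 1
    · norm_num
    · rw [← ih (s + 1), List.map_map]
      congr 1
      apply List.map_congr_left
      intro k _
      simp only [Function.comp_def, zero_add]
      have h1 : ((Nat.succ k : Nat) : Int) = (k : Int) + 1 := by push_cast; ring
      have h2 : PySem.List.pyGetD (x :: xs) ((k : Int) + 1) d = PySem.List.pyGetD xs (k : Int) d := by
        rw [show ((k:Int) + 1) = (((k+1 : Nat)) : Int) by push_cast; ring]
        simp only [PySem.List.pyGetD_natCast, List.getD_cons_succ]
      rw [h1, h2]
      ring_nf

lemma sum_flatMap_int {α : Type} (l : List α) (f : α → List Int) :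
    (l.flatMap f).sum = (l.map (fun a => (f a).sum)).sum := by
  induction l with
  | nil => rfl
  | cons x xs ih => simp [ih]

lemma sum_filter_map {α : Type} (l : List α) (p : α → Bool) (f : α → Int) :
    ((l.filter p).map f).sum = (l.map (fun c => if p c then f c else 0)).sum := by
  induction l with
  | nil => rfl
  | cons x xs ih =>
    by_cases h : p x <;> simp [List.filter_cons, h, ih]

lemma length_filter_int {α : Type} (l : List α) (p : α → Bool) :
    (((l.filter p).length : Nat) : Int) = (l.map (fun c => if p c then (1 : Int) else 0)).sum := by
  induction l with
  | nil => rfl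
  | cons x xs ih =>
    by_cases h : p x <;> simp [List.filter_cons, h, ← ih] <;> push_cast <;> ring

lemma mem_enumerate_fst_le {α : Type} (l : List α) (s : Int) :
    ∀ p ∈ PySem.List.enumerate l s, s ≤ p.1 := by
  induction l generalizing s with
  | nil => intro p h; simp [PySem.List.enumerate] at h
  | cons x xs ih =>
    intro p h
    rw [PySem.List.enumerate_cons, List.mem_cons] at h
    rcases h with h | h
    · simp [h]
    · have := ih (s + 1) p h; omega

lemma cellSum_pyRange (bl : List (List String)) (δ : Int → List String → Int → String → Int) :
    ((PySem.List.pyRange 0 (bl.length : Int) 1).map (fun ri =>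
      ((PySem.List.pyRange 0 ((PySem.List.pyGetD bl ri []).length : Int) 1).map
        (fun ci => δ ri (PySem.List.pyGetD bl ri []) ci
          (PySem.List.pyGetD (PySem.List.pyGetD bl ri []) ci ""))).sum)).sum
  = cellSum bl δ := by
  have houter := sum_idx_enum bl []
    (fun i row => ((PySem.List.pyRange 0 (row.length : Int) 1).map
      (fun ci => δ i row ci (PySem.List.pyGetD row ci ""))).sum) 0
  simp only [zero_add] at houter
  rw [houter]
  unfold cellSum
  congr 1
  apply List.map_congr_left
  intro p _
  have hinner := sum_idx_enum p.2 ""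
    (fun ci c => δ p.1 p.2 ci c) 0
  simp only [zero_add] at hinner
  exact hinner

lemma cellSum_of_cell (bl : List (List String)) (h : String → Int) :
    cellSum bl (fun _ _ _ c => h c) = (bl.map (fun row => (row.map h).sum)).sum := by
  unfold cellSum
  have : ∀ row : List String,
      ((PySem.List.enumerate row 0).map (fun q : Int × String => h q.2)).sum = (row.map h).sum := by
    intro row
    rw [show (fun q : Int × String => h q.2) = h ∘ (fun q : Int × String => q.2) from rfl,
      ← List.map_map, PySem.List.map_snd_enumerate]
  calc ((PySem.List.enumerate bl 0).map (fun p =>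
          ((PySem.List.enumerate p.2 0).map (fun q => h q.2)).sum)).sum
      = ((PySem.List.enumerate bl 0).map ((fun row => (row.map h).sum) ∘ (fun p : Int × List String => p.2))).sum := by
        congr 1; apply List.map_congr_left; intro p _; exact this p.2
    _ = (bl.map (fun row => (row.map h).sum)).sum := by
        rw [← List.map_map, PySem.List.map_snd_enumerate]

-- A computes exactly the four per-material cell sums
lemma A_char (bl : List (List String)) :
    get_scores bl =
      [cellSum bl (fun _ _ _ c => dG c),
       recChain (cellSum bl (fun _ _ _ c => dR c)),
       cellSum bl (fun ri _ _ c => dS ri c),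
       cellSum bl (dW bl)] := by
  unfold get_scores recChain
  have hstep : ∀ (ri : Int) (st : Int × Int × Int × Int) (ci : Int),
      (let col := PySem.List.pyGetD (PySem.List.pyGetD bl ri []) ci ""
       if PySem.Str.isIn "--" col then st
       else if PySem.Str.isIn "G" col then
         (st.1 + ((PySem.Str.pyGet? col 1).bind (fun ch => PySem.Int.ofChars? [ch])).getD 0,
          st.2.1, st.2.2.1, st.2.2.2)
       else if PySem.Str.isIn "R" col then
         (st.1, st.2.1 + 1, st.2.2.1, st.2.2.2)
       else if PySem.Str.isIn "S" col then
         (st.1, st.2.1,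
          st.2.2.1 + (if ri = 0 then 2 else if ri = 1 then 3 else if ri = 2 then 5 else 8),
          st.2.2.2)
       else if PySem.Str.isIn "W" col then
         let fr : Int := ((PySem.List.index? bl (PySem.List.pyGetD bl ri [])).getD 0 : Nat)
         let w1 : Int := if fr > 0 then
             (if PySem.List.pyGetD (PySem.List.pyGetD bl (ri - 1) []) ci "" ≠ "--" then 2 else 0) else 0
         let w2 : Int := if fr < (bl.length : Int) - 1 then
             (if PySem.List.pyGetD (PySem.List.pyGetD bl (ri + 1) []) ci "" ≠ "--" then 2 else 0) else 0
         let fc : Int := ((PySem.List.index? (PySem.List.pyGetD bl ri []) col).getD 0 : Nat)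
         let w3 : Int := if fc > 0 then
             (if PySem.List.pyGetD (PySem.List.pyGetD bl ri []) (ci - 1) "" ≠ "--" then 2 else 0) else 0
         let w4 : Int := if fc < ((PySem.List.pyGetD bl ri []).length : Int) - 1 then
             (if PySem.List.pyGetD (PySem.List.pyGetD bl ri []) (ci + 1) "" ≠ "--" then 2 else 0) else 0
         (st.1, st.2.1, st.2.2.1, st.2.2.2 + w1 + w2 + w3 + w4)
       else st)
      = (st.1 + dG (PySem.List.pyGetD (PySem.List.pyGetD bl ri []) ci ""),
         st.2.1 + dR (PySem.List.pyGetD (PySem.List.pyGetD bl ri []) ci ""),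
         st.2.2.1 + dS ri (PySem.List.pyGetD (PySem.List.pyGetD bl ri []) ci ""),
         st.2.2.2 + dW bl ri (PySem.List.pyGetD bl ri []) ci
           (PySem.List.pyGetD (PySem.List.pyGetD bl ri []) ci "")) := by
    intro ri st ci
    simp only [dG, dR, dS, dW, cellInt]
    by_cases h1 : (PySem.Chars.isIn ['-', '-'] (PySem.List.pyGetD (PySem.List.pyGetD bl ri []) ci "").toList = true)
    · simp [h1]
    by_cases h2 : (PySem.Chars.isIn ['G'] (PySem.List.pyGetD (PySem.List.pyGetD bl ri []) ci "").toList = true)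
    · simp [h1, h2]
    by_cases h3 : (PySem.Chars.isIn ['R'] (PySem.List.pyGetD (PySem.List.pyGetD bl ri []) ci "").toList = true)
    · simp [h1, h2, h3]
    by_cases h4 : (PySem.Chars.isIn ['S'] (PySem.List.pyGetD (PySem.List.pyGetD bl ri []) ci "").toList = true)
    · simp [h1, h2, h3, h4]
    by_cases h5 : (PySem.Chars.isIn ['W'] (PySem.List.pyGetD (PySem.List.pyGetD bl ri []) ci "").toList = true)
    · simp [h1, h2, h3, h4, h5, add_assoc]
    · simp [h1, h2, h3, h4, h5]
  rw [foldl_ext _ (fun (st : Int × Int × Int × Int) (ri : Int) =>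
      (st.1 + ((PySem.List.pyRange 0 ((PySem.List.pyGetD bl ri []).length : Int) 1).map (fun ci => dG (PySem.List.pyGetD (PySem.List.pyGetD bl ri []) ci ""))).sum,
       st.2.1 + ((PySem.List.pyRange 0 ((PySem.List.pyGetD bl ri []).length : Int) 1).map (fun ci => dR (PySem.List.pyGetD (PySem.List.pyGetD bl ri []) ci ""))).sum,
       st.2.2.1 + ((PySem.List.pyRange 0 ((PySem.List.pyGetD bl ri []).length : Int) 1).map (fun ci => dS ri (PySem.List.pyGetD (PySem.List.pyGetD bl ri []) ci ""))).sum,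
       st.2.2.2 + ((PySem.List.pyRange 0 ((PySem.List.pyGetD bl ri []).length : Int) 1).map (fun ci => dW bl ri (PySem.List.pyGetD bl ri []) ci (PySem.List.pyGetD (PySem.List.pyGetD bl ri []) ci ""))).sum))
    (fun st ri => by rw [foldl_ext _ _ (hstep ri), foldl4]), foldl4]
  have hG := cellSum_pyRange bl (fun _ _ _ c => dG c)
  have hR := cellSum_pyRange bl (fun _ _ _ c => dR c)
  have hS := cellSum_pyRange bl (fun ri _ _ c => dS ri c)
  have hW := cellSum_pyRange bl (dW bl)
  dsimp only at hG hR hS hW ⊢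
  rw [zero_add, zero_add, zero_add, zero_add, hG, hR, hS, hW]

-- the four components of B
lemma dG_kind (c : String) : (if material c = "G" then cellInt c else 0) = dG c := by
  unfold material dG
  split_ifs <;> simp_all

lemma dR_kind (c : String) : (if material c = "R" then (1 : Int) else 0) = dR c := by
  unfold material dR
  split_ifs <;> simp_all

lemma pts_eq (r : Int) (h : 0 ≤ r) :
    PySem.List.pyGetD ([2, 3, 5, 8] : List Int) (min r 3) 0
      = (if r = 0 then (2:Int) else if r = 1 then 3 else if r = 2 then 5 else 8) := by
  by_cases h0 : r = 0
  · subst h0; decide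
  · by_cases h1 : r = 1
    · subst h1; decide
    · by_cases h2 : r = 2
      · subst h2; decide
      · have h3 : min r 3 = 3 := by omega
        rw [h3]
        simp [h0, h1, h2]
        decide

lemma dS_kind (r : Int) (h : 0 ≤ r) (c : String) :
    (if material c = "S" then PySem.List.pyGetD ([2, 3, 5, 8] : List Int) (min r 3) 0 else 0)
      = dS r c := by
  unfold material dS
  rw [pts_eq r h]
  split_ifs <;> simp_all

lemma glass_eq (bl : List (List String)) :
    (bl.flatMap (fun row => (row.filter (fun c => material c = "G")).map cellInt)).sum
      = cellSum bl (fun _ _ _ c => dG c) := by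
  rw [sum_flatMap_int, cellSum_of_cell]
  congr 1
  apply List.map_congr_left
  intro row _
  rw [sum_filter_map]
  congr 1
  apply List.map_congr_left
  intro c _
  simp only [decide_eq_true_eq]
  exact dG_kind c

lemma row_count (row : List String) :
    (((row.filter (fun c => material c = "R")).length : Nat) : Int) = (row.map dR).sum := by
  rw [length_filter_int]
  congr 1
  apply List.map_congr_left
  intro c _
  simp only [decide_eq_true_eq]
  exact dR_kind c

lemma count_eq (bl : List (List String)) :
    (((bl.flatMap (fun row => row.filter (fun c => material c = "R"))).length : Nat) : Int)
      = cellSum bl (fun _ _ _ c => dR c) := by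
  rw [cellSum_of_cell]
  induction bl with
  | nil => rfl
  | cons r bs ih =>
    rw [List.flatMap_cons, List.length_append, List.map_cons, List.sum_cons, ← ih, ← row_count r]
    push_cast
    ring

lemma rec_eq (n : Nat) :
    (if (n : Nat) ≤ 5 then PySem.List.pyGetD ([0, 2, 5, 10, 15, 20] : List Int) ((n : Nat) : Int) 0 else 30)
      = recChain ((n : Nat) : Int) := by
  unfold recChain
  rcases n with _|_|_|_|_|_|m
  · decide
  · decide
  · decide
  · decide
  · decide
  · decide
  · have h1 : ¬((m + 6 : Nat) ≤ 5) := by omega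
    push_cast
    split_ifs <;> omega

lemma stone_eq (bl : List (List String)) :
    ((PySem.List.enumerate bl 0).flatMap (fun p =>
      (p.2.filter (fun c => material c = "S")).map (fun _ =>
        PySem.List.pyGetD ([2, 3, 5, 8] : List Int) (min p.1 3) 0))).sum
      = cellSum bl (fun ri _ _ c => dS ri c) := by
  rw [sum_flatMap_int]
  unfold cellSum
  congr 1
  apply List.map_congr_left
  intro p hp
  have hr : (0:Int) ≤ p.1 := mem_enumerate_fst_le bl 0 p hp
  rw [sum_filter_map]
  have : ∀ row : List String,
      ((PySem.List.enumerate row 0).map (fun q : Int × String => dS p.1 q.2)).sum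
        = (row.map (fun c => dS p.1 c)).sum := by
    intro row
    rw [show (fun q : Int × String => dS p.1 q.2) = (fun c => dS p.1 c) ∘ (fun q : Int × String => q.2) from rfl,
      ← List.map_map, PySem.List.map_snd_enumerate]
  rw [this p.2]
  congr 1
  apply List.map_congr_left
  intro c _
  simp only [decide_eq_true_eq]
  exact dS_kind p.1 hr c

-- B's wood pass written as a cell sum of wB
lemma four_sum (f : Int × Int → Bool) :
    ((([((-1 : Int), (0 : Int)), (1, 0), (0, -1), (0, 1)]).filter f).map (fun _ => (2 : Int))).sum
      = (if f (-1, 0) then 2 else 0) + (if f (1, 0) then 2 else 0)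
      + (if f (0, -1) then 2 else 0) + (if f (0, 1) then 2 else 0) := by
  by_cases h1 : f (-1, 0) <;> by_cases h2 : f (1, 0) <;> by_cases h3 : f (0, -1) <;>
    by_cases h4 : f (0, 1) <;> simp [List.filter, h1, h2, h3, h4] <;> norm_num

lemma wood_B_eq (bl : List (List String)) :
    ((PySem.List.enumerate bl 0).flatMap (fun p =>
      (PySem.List.enumerate p.2 0).flatMap (fun q =>
        if material q.2 = "W" then
          (([((-1 : Int), (0 : Int)), (1, 0), (0, -1), (0, 1)]).filter
            (fun d => filledB bl (p.1 + d.1) (q.1 + d.2))).map (fun _ => (2 : Int))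
        else []))).sum
      = cellSum bl (fun ri _ ci c => wB bl ri ci c) := by
  rw [sum_flatMap_int]
  unfold cellSum
  congr 1
  apply List.map_congr_left
  intro p _
  rw [sum_flatMap_int]
  congr 1
  apply List.map_congr_left
  intro q _
  by_cases hW : material q.2 = "W"
  · rw [if_pos hW]
    simp only [wB]
    rw [if_pos hW, four_sum]
    simp [sub_eq_add_neg]
  · simp [hW, wB]

-- the per-cell body of D_get_scores
def Dcell (bl : List (List String)) (p : Int × List String) (q : Int × String) : Prop :=
  (¬ PySem.Str.isIn "--" q.2 = true) ∧ (¬ PySem.Str.isIn "G" q.2 = true) ∧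
  (¬ PySem.Str.isIn "R" q.2 = true) ∧ (¬ PySem.Str.isIn "S" q.2 = true) ∧
  PySem.Str.isIn "W" q.2 = true ∧
  (((PySem.List.index? bl p.2).getD 0 = 0 ∧ 0 < p.1 ∧
      q.1 < ((PySem.List.pyGetD bl (p.1 - 1) []).length : Int) ∧
      PySem.List.pyGetD (PySem.List.pyGetD bl (p.1 - 1) []) q.1 "" ≠ "--")
   ∨ ((PySem.List.index? p.2 q.2).getD 0 = 0 ∧ 0 < q.1 ∧
      PySem.List.pyGetD p.2 (q.1 - 1) "" ≠ "--"))

lemma D_iff (bl : List (List String)) :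
    D_get_scores bl ↔ ∃ p ∈ PySem.List.enumerate bl 0, ∃ q ∈ PySem.List.enumerate p.2 0,
      Dcell bl p q := Iff.rfl

lemma first_le {α : Type} [BEq α] [LawfulBEq α] (xs : List α) (k : Nat) (hk : k < xs.length) :
    ∃ f : Nat, PySem.List.index? xs xs[k] = some f ∧ f ≤ k := by
  have hmem : xs[k] ∈ xs := List.getElem_mem hk
  have hs : (PySem.List.index? xs xs[k]).isSome := (PySem.List.index?_isSome_iff xs xs[k]).mpr hmem
  obtain ⟨f, hf⟩ := Option.isSome_iff_exists.mp hs
  obtain ⟨hfl, hxf, hmin⟩ := PySem.List.getElem_of_index?_eq_some hf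
  refine ⟨f, hf, ?_⟩
  by_contra h
  exact hmin k (by omega) rfl

lemma up_tri (bl : List (List String)) (k j fN : Nat) (hk : k < bl.length) (hfk : fN ≤ k)
    (hup : 0 < fN → (j:Int) < ((PySem.List.pyGetD bl ((k:Int) - 1) []).length : Int)) :
    ((if ((fN:Nat):Int) > 0 then (if PySem.List.pyGetD (PySem.List.pyGetD bl ((k:Int) - 1) []) (j:Int) "" ≠ "--" then (2:Int) else 0) else 0)
      ≤ (if filledB bl ((k:Int) - 1) (j:Int) then 2 else 0))
    ∧ (¬(fN = 0 ∧ 0 < (k:Int) ∧ (j:Int) < ((PySem.List.pyGetD bl ((k:Int) - 1) []).length : Int) ∧ PySem.List.pyGetD (PySem.List.pyGetD bl ((k:Int) - 1) []) (j:Int) "" ≠ "--")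
        → (if ((fN:Nat):Int) > 0 then (if PySem.List.pyGetD (PySem.List.pyGetD bl ((k:Int) - 1) []) (j:Int) "" ≠ "--" then (2:Int) else 0) else 0)
          = (if filledB bl ((k:Int) - 1) (j:Int) then 2 else 0))
    ∧ ((fN = 0 ∧ 0 < (k:Int) ∧ (j:Int) < ((PySem.List.pyGetD bl ((k:Int) - 1) []).length : Int) ∧ PySem.List.pyGetD (PySem.List.pyGetD bl ((k:Int) - 1) []) (j:Int) "" ≠ "--")
        → (if ((fN:Nat):Int) > 0 then (if PySem.List.pyGetD (PySem.List.pyGetD bl ((k:Int) - 1) []) (j:Int) "" ≠ "--" then (2:Int) else 0) else 0)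
          < (if filledB bl ((k:Int) - 1) (j:Int) then 2 else 0)) := by
  have hc2 : (k:Int) - 1 < (bl.length:Int) := by
    have : (k:Int) < (bl.length:Int) := by exact_mod_cast hk
    omega
  have hc3 : (0:Int) ≤ (j:Int) := Int.natCast_nonneg j
  by_cases hf0 : 0 < fN
  · have hkpos : 0 < k := lt_of_lt_of_le hf0 hfk
    have hjlen := hup hf0
    have hc1 : (0:Int) ≤ (k:Int) - 1 := by omega
    have hfill : filledB bl ((k:Int) - 1) (j:Int)
        = decide (PySem.List.pyGetD (PySem.List.pyGetD bl ((k:Int) - 1) []) (j:Int) "" ≠ "--") := by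
      simp only [filledB]
      rw [decide_eq_decide]
      exact ⟨fun h => h.2.2.2.2, fun h => ⟨hc1, hc2, hc3, hjlen, h⟩⟩
    have hg : (((fN:Nat):Int) > 0) := by exact_mod_cast hf0
    rw [hfill, if_pos hg]
    refine ⟨?_, fun _ => ?_, fun hD => absurd hD.1 (by omega)⟩ <;>
      by_cases hr : PySem.List.pyGetD (PySem.List.pyGetD bl ((k:Int) - 1) []) (j:Int) "" ≠ "--" <;>
      simp [hr]
  · have hf0' : fN = 0 := by omega
    have hg : ¬(((fN:Nat):Int) > 0) := by omega
    rw [if_neg hg]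
    by_cases hk0 : 0 < (k:Int)
    · by_cases hfb : filledB bl ((k:Int) - 1) (j:Int) = true
      · have hcon := of_decide_eq_true hfb
        rw [if_pos hfb]
        exact ⟨by omega, fun hnD => absurd ⟨hf0', hk0, hcon.2.2.2.1, hcon.2.2.2.2⟩ hnD,
               fun _ => by omega⟩
      · rw [if_neg hfb]
        refine ⟨le_refl 0, fun _ => rfl, fun hD => ?_⟩
        exact absurd (show filledB bl ((k:Int) - 1) (j:Int) = true by
          simp only [filledB]
          exact decide_eq_true ⟨by omega, hc2, hc3, hD.2.2.1, hD.2.2.2⟩) hfb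
    · have hfb : filledB bl ((k:Int) - 1) (j:Int) = false := by
        simp only [filledB, decide_eq_false_iff_not]
        intro h; exact absurd h.1 (by omega)
      rw [hfb]
      exact ⟨by norm_num, fun _ => by norm_num, fun hD => absurd hD.2.1 hk0⟩

lemma down_tri (bl : List (List String)) (k j fN : Nat) (hk : k < bl.length) (hfk : fN ≤ k)
    (hdn : ((fN:Nat):Int) < (bl.length:Int) - 1 →
      ((PySem.List.pyGet? bl ((k:Int) + 1)).bind (fun r2 => PySem.List.pyGet? r2 (j:Int))).isSome = true) :
    (if ((fN:Nat):Int) < (bl.length:Int) - 1 then (if PySem.List.pyGetD (PySem.List.pyGetD bl ((k:Int) + 1) []) (j:Int) "" ≠ "--" then (2:Int) else 0) else 0)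
      = (if filledB bl ((k:Int) + 1) (j:Int) then 2 else 0) := by
  have hcast : ((k:Int) + 1) = (((k + 1 : Nat)):Int) := by push_cast; ring
  by_cases hke : k + 1 < bl.length
  · have hg : ((fN:Nat):Int) < (bl.length:Int) - 1 := by
      have : (k + 1 : Nat) < bl.length := hke
      omega
    have hsome := hdn hg
    rw [hcast, PySem.List.pyGet?_natCast] at hsome
    rw [List.getElem?_eq_getElem hke] at hsome
    simp only [Option.bind_some, PySem.List.pyGet?_natCast, Option.isSome_iff_exists] at hsome
    have hjlen : j < bl[k + 1].length := by
      obtain ⟨x, hx⟩ := hsome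
      exact (List.getElem?_eq_some_iff.mp hx).1
    have hrowdn : PySem.List.pyGetD bl ((k:Int) + 1) [] = bl[k + 1] := by
      rw [hcast, PySem.List.pyGetD_natCast, List.getD_eq_getElem bl [] hke]
    have hfill : filledB bl ((k:Int) + 1) (j:Int)
        = decide (PySem.List.pyGetD (PySem.List.pyGetD bl ((k:Int) + 1) []) (j:Int) "" ≠ "--") := by
      simp only [filledB]
      rw [decide_eq_decide]
      refine ⟨fun h => h.2.2.2.2, fun h => ⟨by omega, by exact_mod_cast hke, Int.natCast_nonneg j, ?_, h⟩⟩
      rw [hrowdn]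
      exact_mod_cast hjlen
    rw [if_pos hg, hfill]
    by_cases hr : PySem.List.pyGetD (PySem.List.pyGetD bl ((k:Int) + 1) []) (j:Int) "" ≠ "--" <;>
      simp [hr]
  · have hfb : filledB bl ((k:Int) + 1) (j:Int) = false := by
      simp only [filledB, decide_eq_false_iff_not]
      intro h
      have : ((k:Int) + 1) < (bl.length : Int) := h.2.1
      omega
    rw [hfb]
    have hg : ¬(((fN:Nat):Int) < (bl.length:Int) - 1) := by
      intro hg
      have hsome := hdn hg
      rw [hcast, PySem.List.pyGet?_natCast, List.getElem?_eq_none (by omega)] at hsome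
      simp at hsome
    rw [if_neg hg]
    norm_num

lemma left_tri (bl : List (List String)) (row : List String) (k j cN : Nat)
    (hk : k < bl.length) (hrow : PySem.List.pyGetD bl (k:Int) [] = row)
    (hj : j < row.length) (hcj : cN ≤ j) :
    ((if ((cN:Nat):Int) > 0 then (if PySem.List.pyGetD row ((j:Int) - 1) "" ≠ "--" then (2:Int) else 0) else 0)
      ≤ (if filledB bl (k:Int) ((j:Int) - 1) then 2 else 0))
    ∧ (¬(cN = 0 ∧ 0 < (j:Int) ∧ PySem.List.pyGetD row ((j:Int) - 1) "" ≠ "--")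
        → (if ((cN:Nat):Int) > 0 then (if PySem.List.pyGetD row ((j:Int) - 1) "" ≠ "--" then (2:Int) else 0) else 0)
          = (if filledB bl (k:Int) ((j:Int) - 1) then 2 else 0))
    ∧ ((cN = 0 ∧ 0 < (j:Int) ∧ PySem.List.pyGetD row ((j:Int) - 1) "" ≠ "--")
        → (if ((cN:Nat):Int) > 0 then (if PySem.List.pyGetD row ((j:Int) - 1) "" ≠ "--" then (2:Int) else 0) else 0)
          < (if filledB bl (k:Int) ((j:Int) - 1) then 2 else 0)) := by
  have hkI : (k:Int) < (bl.length:Int) := by exact_mod_cast hk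
  have hjI : (j:Int) < (row.length:Int) := by exact_mod_cast hj
  have hfill0 : ∀ (hj0 : 0 < j), filledB bl (k:Int) ((j:Int) - 1)
      = decide (PySem.List.pyGetD row ((j:Int) - 1) "" ≠ "--") := by
    intro hj0
    simp only [filledB, hrow]
    rw [decide_eq_decide]
    exact ⟨fun h => h.2.2.2.2,
           fun h => ⟨Int.natCast_nonneg k, hkI, by omega, by omega, h⟩⟩
  by_cases hc0 : 0 < cN
  · have hj0 : 0 < j := lt_of_lt_of_le hc0 hcj
    have hg : (((cN:Nat):Int) > 0) := by exact_mod_cast hc0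
    rw [hfill0 hj0, if_pos hg]
    refine ⟨?_, fun _ => ?_, fun hD => absurd hD.1 (by omega)⟩ <;>
      by_cases hr : PySem.List.pyGetD row ((j:Int) - 1) "" ≠ "--" <;> simp [hr]
  · have hc0' : cN = 0 := by omega
    have hg : ¬(((cN:Nat):Int) > 0) := by omega
    rw [if_neg hg]
    by_cases hj0 : 0 < j
    · rw [hfill0 hj0]
      by_cases hr : PySem.List.pyGetD row ((j:Int) - 1) "" ≠ "--"
      · rw [decide_eq_true hr]
        exact ⟨by norm_num, fun hnD => absurd ⟨hc0', by exact_mod_cast hj0, hr⟩ hnD,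
               fun _ => by norm_num⟩
      · rw [decide_eq_false hr]
        exact ⟨by norm_num, fun _ => by norm_num, fun hD => absurd hD.2.2 hr⟩
    · have hfb : filledB bl (k:Int) ((j:Int) - 1) = false := by
        simp only [filledB, decide_eq_false_iff_not]
        intro h
        have := h.2.2.1
        omega
      rw [hfb]
      exact ⟨by norm_num, fun _ => by norm_num, fun hD => absurd hD.2.1 (by omega)⟩

lemma right_tri (bl : List (List String)) (row : List String) (k j cN : Nat)
    (hk : k < bl.length) (hrow : PySem.List.pyGetD bl (k:Int) [] = row)
    (hj : j < row.length) (hcj : cN ≤ j)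
    (hrt : ((cN:Nat):Int) < (row.length:Int) - 1 → (PySem.List.pyGet? row ((j:Int) + 1)).isSome = true) :
    (if ((cN:Nat):Int) < (row.length:Int) - 1 then (if PySem.List.pyGetD row ((j:Int) + 1) "" ≠ "--" then (2:Int) else 0) else 0)
      = (if filledB bl (k:Int) ((j:Int) + 1) then 2 else 0) := by
  have hkI : (k:Int) < (bl.length:Int) := by exact_mod_cast hk
  have hcast : ((j:Int) + 1) = (((j + 1 : Nat)):Int) := by push_cast; ring
  by_cases hje : j + 1 < row.length
  · have hg : ((cN:Nat):Int) < (row.length:Int) - 1 := by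
      have : (j + 1 : Nat) < row.length := hje
      omega
    have hfill : filledB bl (k:Int) ((j:Int) + 1)
        = decide (PySem.List.pyGetD row ((j:Int) + 1) "" ≠ "--") := by
      simp only [filledB, hrow]
      rw [decide_eq_decide]
      exact ⟨fun h => h.2.2.2.2,
             fun h => ⟨Int.natCast_nonneg k, hkI, by omega, by exact_mod_cast hje, h⟩⟩
    rw [if_pos hg, hfill]
    by_cases hr : PySem.List.pyGetD row ((j:Int) + 1) "" ≠ "--" <;> simp [hr]
  · have hfb : filledB bl (k:Int) ((j:Int) + 1) = false := by
      simp only [filledB, hrow, decide_eq_false_iff_not]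
      intro h
      have := h.2.2.2.1
      omega
    rw [hfb]
    have hg : ¬(((cN:Nat):Int) < (row.length:Int) - 1) := by
      intro hg
      have hsome := hrt hg
      rw [hcast, PySem.List.pyGet?_natCast, List.getElem?_eq_none (by omega)] at hsome
      simp at hsome
    rw [if_neg hg]
    norm_num



lemma cell_tri (bl : List (List String)) (hpre : Pre_get_scores bl)
    (p : Int × List String) (hp : p ∈ PySem.List.enumerate bl 0)
    (q : Int × String) (hq : q ∈ PySem.List.enumerate p.2 0) :
    dW bl p.1 p.2 q.1 q.2 ≤ wB bl p.1 q.1 q.2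
    ∧ (¬ Dcell bl p q → dW bl p.1 p.2 q.1 q.2 = wB bl p.1 q.1 q.2)
    ∧ (Dcell bl p q → dW bl p.1 p.2 q.1 q.2 < wB bl p.1 q.1 q.2) := by
  obtain ⟨k, hk, hpk⟩ := (PySem.List.mem_enumerate_iff bl 0 p).mp hp
  rw [show (0:Int) + k = (k:Int) by ring] at hpk
  subst hpk
  obtain ⟨j, hj, hqj⟩ := (PySem.List.mem_enumerate_iff _ 0 q).mp hq
  rw [show (0:Int) + j = (j:Int) by ring] at hqj
  subst hqj
  dsimp only at hj ⊢
  by_cases h1 : PySem.Chars.isIn ['-', '-'] bl[k][j].toList = true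
  · have hA : dW bl (k:Int) bl[k] (j:Int) bl[k][j] = 0 := by simp [dW, h1]
    have hB : wB bl (k:Int) (j:Int) bl[k][j] = 0 := by simp [wB, material, h1]
    exact ⟨by rw [hA, hB], fun _ => by rw [hA, hB],
           fun hD => absurd (show PySem.Str.isIn "--" bl[k][j] = true by simpa using h1) hD.1⟩
  by_cases h2 : PySem.Chars.isIn ['G'] bl[k][j].toList = true
  · have hA : dW bl (k:Int) bl[k] (j:Int) bl[k][j] = 0 := by simp [dW, h1, h2]
    have hB : wB bl (k:Int) (j:Int) bl[k][j] = 0 := by simp [wB, material, h1, h2]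
    exact ⟨by rw [hA, hB], fun _ => by rw [hA, hB],
           fun hD => absurd (show PySem.Str.isIn "G" bl[k][j] = true by simpa using h2) hD.2.1⟩
  by_cases h3 : PySem.Chars.isIn ['R'] bl[k][j].toList = true
  · have hA : dW bl (k:Int) bl[k] (j:Int) bl[k][j] = 0 := by simp [dW, h1, h2, h3]
    have hB : wB bl (k:Int) (j:Int) bl[k][j] = 0 := by simp [wB, material, h1, h2, h3]
    exact ⟨by rw [hA, hB], fun _ => by rw [hA, hB],
           fun hD => absurd (show PySem.Str.isIn "R" bl[k][j] = true by simpa using h3) hD.2.2.1⟩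
  by_cases h4 : PySem.Chars.isIn ['S'] bl[k][j].toList = true
  · have hA : dW bl (k:Int) bl[k] (j:Int) bl[k][j] = 0 := by simp [dW, h1, h2, h3, h4]
    have hB : wB bl (k:Int) (j:Int) bl[k][j] = 0 := by simp [wB, material, h1, h2, h3, h4]
    exact ⟨by rw [hA, hB], fun _ => by rw [hA, hB],
           fun hD => absurd (show PySem.Str.isIn "S" bl[k][j] = true by simpa using h4) hD.2.2.2.1⟩
  by_cases h5 : PySem.Chars.isIn ['W'] bl[k][j].toList = true
  case neg =>
    have hA : dW bl (k:Int) bl[k] (j:Int) bl[k][j] = 0 := by simp [dW, h1, h2, h3, h4, h5]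
    have hB : wB bl (k:Int) (j:Int) bl[k][j] = 0 := by simp [wB, material, h1, h2, h3, h4, h5]
    exact ⟨by rw [hA, hB], fun _ => by rw [hA, hB],
           fun hD => absurd hD.2.2.2.2.1 (by simpa using h5)⟩
  case pos =>
  have h1s : ¬ PySem.Str.isIn "--" bl[k][j] = true := by simpa using h1
  have h2s : ¬ PySem.Str.isIn "G" bl[k][j] = true := by simpa using h2
  have h3s : ¬ PySem.Str.isIn "R" bl[k][j] = true := by simpa using h3
  have h4s : ¬ PySem.Str.isIn "S" bl[k][j] = true := by simpa using h4
  have h5s : PySem.Str.isIn "W" bl[k][j] = true := by simpa using h5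
  have hPre := hpre _ hp _ hq h1s
  obtain ⟨hupP, hdnP, hrtP⟩ := hPre.2 h2s h3s h4s h5s
  dsimp only at hupP hdnP hrtP
  obtain ⟨fN, hfr, hfk⟩ := first_le bl k hk
  obtain ⟨cN, hfc, hcj⟩ := first_le bl[k] j hj
  rw [hfr] at hupP hdnP
  rw [hfc] at hrtP
  simp only [Option.getD_some] at hupP hdnP hrtP
  have hmat : material bl[k][j] = "W" := by simp [material, h1, h2, h3, h4, h5]
  have hrow : PySem.List.pyGetD bl (k:Int) [] = bl[k] := by
    rw [PySem.List.pyGetD_natCast, List.getD_eq_getElem bl [] hk]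
  have hup' : 0 < fN → (j:Int) < ((PySem.List.pyGetD bl ((k:Int) - 1) []).length : Int) := by
    intro h
    have hs := hupP h
    rw [PySem.List.pyGet?_natCast] at hs
    have : j < (PySem.List.pyGetD bl ((k:Int) - 1) []).length := by simpa using hs
    exact_mod_cast this
  have hdn' : ((fN:Nat):Int) < (bl.length:Int) - 1 →
      ((PySem.List.pyGet? bl ((k:Int) + 1)).bind (fun r2 => PySem.List.pyGet? r2 (j:Int))).isSome = true := by
    intro h
    exact hdnP h
  have hrt' : ((cN:Nat):Int) < ((bl[k].length:Nat):Int) - 1 →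
      (PySem.List.pyGet? bl[k] ((j:Int) + 1)).isSome = true := by
    intro h
    exact hrtP h
  have eA : dW bl (k:Int) bl[k] (j:Int) bl[k][j]
      = (if ((fN:Nat):Int) > 0 then (if PySem.List.pyGetD (PySem.List.pyGetD bl ((k:Int) - 1) []) (j:Int) "" ≠ "--" then (2:Int) else 0) else 0)
      + (if ((fN:Nat):Int) < (bl.length:Int) - 1 then (if PySem.List.pyGetD (PySem.List.pyGetD bl ((k:Int) + 1) []) (j:Int) "" ≠ "--" then (2:Int) else 0) else 0)
      + (if ((cN:Nat):Int) > 0 then (if PySem.List.pyGetD bl[k] ((j:Int) - 1) "" ≠ "--" then (2:Int) else 0) else 0)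
      + (if ((cN:Nat):Int) < ((bl[k].length:Nat):Int) - 1 then (if PySem.List.pyGetD bl[k] ((j:Int) + 1) "" ≠ "--" then (2:Int) else 0) else 0) := by
    simp only [dW, if_neg h1s, if_neg h2s, if_neg h3s, if_neg h4s, if_pos h5s, hfr, hfc,
      Option.getD_some]
  have eB : wB bl (k:Int) (j:Int) bl[k][j]
      = (if filledB bl ((k:Int) - 1) (j:Int) then 2 else 0)
      + (if filledB bl ((k:Int) + 1) (j:Int) then 2 else 0)
      + (if filledB bl (k:Int) ((j:Int) - 1) then 2 else 0)
      + (if filledB bl (k:Int) ((j:Int) + 1) then 2 else 0) := by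
    simp only [wB, if_pos hmat]
  have hDc : Dcell bl ((k:Int), bl[k]) ((j:Int), bl[k][j]) ↔
      ((fN = 0 ∧ 0 < (k:Int) ∧ (j:Int) < ((PySem.List.pyGetD bl ((k:Int) - 1) []).length : Int)
          ∧ PySem.List.pyGetD (PySem.List.pyGetD bl ((k:Int) - 1) []) (j:Int) "" ≠ "--")
       ∨ (cN = 0 ∧ 0 < (j:Int) ∧ PySem.List.pyGetD bl[k] ((j:Int) - 1) "" ≠ "--")) := by
    unfold Dcell
    dsimp only
    rw [hfr, hfc]
    simp only [Option.getD_some]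
    exact ⟨fun h => h.2.2.2.2.2, fun h => ⟨h1s, h2s, h3s, h4s, h5s, h⟩⟩
  obtain ⟨u1, u2, u3⟩ := up_tri bl k j fN hk hfk hup'
  have d1 := down_tri bl k j fN hk hfk hdn'
  obtain ⟨l1, l2, l3⟩ := left_tri bl bl[k] k j cN hk hrow hj hcj
  have r1 := right_tri bl bl[k] k j cN hk hrow hj hcj hrt'
  rw [eA, eB]
  refine ⟨by omega, fun hnD => ?_, fun hD => ?_⟩
  · have hu := u2 (fun hu => hnD (hDc.mpr (Or.inl hu)))
    have hl := l2 (fun hl => hnD (hDc.mpr (Or.inr hl)))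
    omega
  · rcases hDc.mp hD with hu | hl
    · have := u3 hu
      omega
    · have := l3 hl
      omega

lemma cellSum_tri (bl : List (List String)) (hpre : Pre_get_scores bl) :
    cellSum bl (dW bl) ≤ cellSum bl (fun ri _ ci c => wB bl ri ci c)
    ∧ (¬ D_get_scores bl → cellSum bl (dW bl) = cellSum bl (fun ri _ ci c => wB bl ri ci c))
    ∧ (D_get_scores bl → cellSum bl (dW bl) < cellSum bl (fun ri _ ci c => wB bl ri ci c)) := by
  unfold cellSum
  refine ⟨?_, fun hnD => ?_, fun hD => ?_⟩
  · apply List.sum_le_sum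
    intro p hp
    apply List.sum_le_sum
    intro q hq
    exact (cell_tri bl hpre p hp q hq).1
  · have hnc : ∀ p ∈ PySem.List.enumerate bl 0, ∀ q ∈ PySem.List.enumerate p.2 0,
        ¬ Dcell bl p q := fun p hp q hq hc => hnD ((D_iff bl).mpr ⟨p, hp, q, hq, hc⟩)
    congr 1
    apply List.map_congr_left
    intro p hp
    congr 1
    apply List.map_congr_left
    intro q hq
    exact (cell_tri bl hpre p hp q hq).2.1 (hnc p hp q hq)
  · obtain ⟨p, hp, q, hq, hc⟩ := (D_iff bl).mp hD
    apply List.sum_lt_sum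
    · intro r hr
      apply List.sum_le_sum
      intro t ht
      exact (cell_tri bl hpre r hr t ht).1
    · refine ⟨p, hp, ?_⟩
      apply List.sum_lt_sum
      · intro t ht
        exact (cell_tri bl hpre p hp t ht).1
      · exact ⟨q, hq, (cell_tri bl hpre p hp q hq).2.2 hc⟩

-- ===== VERDICT (by name: the statement is the Claim_ definition above) =====
theorem get_scores_spec : Claim_unchanged_get_scores := by
  intro bl _ hpre
  unfold Spec_get_scores
  intro hnD
  rw [A_char]
  unfold get_scores_alt
  simp only []
  rw [glass_eq, stone_eq, wood_B_eq, ← count_eq, rec_eq,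
    (cellSum_tri bl hpre).2.1 hnD]

theorem get_scores_changed : Claim_changed_get_scores := by
  unfold Claim_changed_get_scores; decide

theorem get_scores_tight : Claim_exact_get_scores := by
  intro bl _ hpre hD heq
  have hlt := (cellSum_tri bl hpre).2.2 hD
  rw [A_char] at heq
  unfold get_scores_alt at heq
  simp only [] at heq
  rw [glass_eq, stone_eq, wood_B_eq, ← count_eq, rec_eq] at heq
  simp only [List.cons.injEq] at heq
  exact absurd heq.2.2.2.1 (ne_of_lt hlt)
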